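-- pv_equiv track=rewrite | github.com/SuhJae/elite-auto | app/actions/align_support/detection.py | _circular_true_group_count
-- ===== SOURCE A (Python) =====
-- def _circular_true_group_count(values: list[bool]) -> int:
--     if not values or not any(values):
--         return 0
--     groups = 0
--     previous = values[-1]
--     for current in values:
--         if current and not previous:
--             groups += 1
--         previous = current
--     return groups
-- ===== SOURCE B (Python) =====
-- def _circular_true_group_count(values: list[bool]) -> int:
--     # Encode the circle as a bit string, rotate it so it starts at a False
--     # (making the circle linear with no run crossing the boundary), then each
--     # True-run corresponds to exactly one "01" substring of the rotated string.
--     bits = "".join("1" if v else "0" for v in values)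
--     pivot = bits.find("0")
--     if pivot == -1:
--         # no False anywhere (empty or all-True circle): no run boundary exists
--         return 0
--     return (bits[pivot:] + bits[:pivot]).count("01")
-- ===== Notes on version B (the rewrite author's own statement) =====
-- stated objective: alternative
-- what changed: Instead of a stateful scan seeded with the last element, B encodes the list as a bit string, rotates it to start at the first False (so no run crosses the circular boundary), and counts '01' substring occurrences, each of which marks one True run.
import Mathlib
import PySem

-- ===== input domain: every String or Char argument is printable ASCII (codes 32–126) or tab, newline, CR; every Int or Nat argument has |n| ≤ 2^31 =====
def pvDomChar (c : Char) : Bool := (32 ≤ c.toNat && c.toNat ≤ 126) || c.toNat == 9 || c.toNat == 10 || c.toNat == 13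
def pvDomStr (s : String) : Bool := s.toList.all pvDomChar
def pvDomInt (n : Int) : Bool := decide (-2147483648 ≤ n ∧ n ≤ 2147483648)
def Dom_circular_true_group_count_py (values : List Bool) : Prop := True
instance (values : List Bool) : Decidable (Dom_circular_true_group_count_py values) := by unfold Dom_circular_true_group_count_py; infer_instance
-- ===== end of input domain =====

-- B replaces A's stateful scan (seeded with the last element) by encoding the list
-- as a bit string, rotating it to start at the first False, and counting "01"
-- substring occurrences (objective: alternative algorithm, same cost).

-- ===== PORT A =====
-- the for-loop: state (groups, previous), one step per element, branch order as in Python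
def circular_true_group_count_py (values : List Bool) : Int :=
  if values.isEmpty || !(values.any id) then 0
  else
    -- previous = values[-1]; the branch guarantees values ≠ [], so pyGet? returns some
    let previous := (PySem.List.pyGet? values (-1)).getD false
    (values.foldl (fun (st : Int × Bool) current =>
      (if current && !st.2 then st.1 + 1 else st.1, current)) (0, previous)).1

-- ===== PORT B =====
-- strings are represented by their character lists (PySem.Chars; exact on this domain):
-- bits = "".join(...); pivot = bits.find("0"); (bits[pivot:] + bits[:pivot]).count("01")
def circular_true_group_count_py_alt (values : List Bool) : Int :=
  let bits : List Char := PySem.Chars.join [] (values.map (fun v => if v then ['1'] else ['0']))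
  let pivot : Int := PySem.Chars.find bits ['0']
  if pivot = -1 then 0
  else
    (PySem.Chars.count (PySem.List.slice bits (some pivot) none
                        ++ PySem.List.slice bits none (some pivot)) ['0', '1'] : Int)

-- ===== PRECONDITION & SPEC =====
def Spec_circular_true_group_count_py (values : List Bool) (out : Int) : Prop := out = circular_true_group_count_py_alt values
instance (values : List Bool) (out : Int) : Decidable (Spec_circular_true_group_count_py values out) := by unfold Spec_circular_true_group_count_py; infer_instance

-- ===== CLAIM (what is proved, stated in full; the proofs are below) =====
def Claim_equal_circular_true_group_count_py : Prop := ∀ (values : List Bool), Dom_circular_true_group_count_py values → Spec_circular_true_group_count_py values (circular_true_group_count_py values)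

-- ===== LEMMAS AND PROOFS =====

/-- Rising-edge count: number of positions i with l[i] = true whose predecessor is
    false, the (virtual) predecessor of the first element being `p`. -/
def cnt (p : Bool) : List Bool → Nat
  | [] => 0
  | b :: t => (if b && !p then 1 else 0) + cnt b t

/-- Circular rising-edge count: predecessor of the first element is the last element. -/
def ccnt (l : List Bool) : Nat := cnt (l.getLastD false) l

def enc (v : Bool) : Char := if v then '1' else '0'

theorem foldl_eq_cnt (l : List Bool) (p : Bool) (acc : Int) :
    (l.foldl (fun (st : Int × Bool) current =>
      (if current && !st.2 then st.1 + 1 else st.1, current)) (acc, p)).1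
      = acc + cnt p l := by
  induction l generalizing p acc with
  | nil => simp [cnt]
  | cons b t ih =>
    simp only [List.foldl_cons]
    rw [ih]
    simp only [cnt]
    by_cases hb : (b && !p) = true <;> simp [hb] <;> push_cast <;> ring

theorem cnt_all_false (l : List Bool) (p : Bool) (h : ∀ x ∈ l, x = false) : cnt p l = 0 := by
  induction l generalizing p with
  | nil => rfl
  | cons b t ih =>
    have hb : b = false := h b (by simp)
    simp [cnt, hb, ih _ (fun x hx => h x (by simp [hx]))]

theorem cnt_all_true (l : List Bool) (h : ∀ x ∈ l, x = true) : cnt true l = 0 := by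
  induction l with
  | nil => rfl
  | cons b t ih =>
    have hb : b = true := h b (by simp)
    subst hb
    simp [cnt, ih (fun x hx => h x (by simp [hx]))]

theorem cnt_append (xs ys : List Bool) (p : Bool) :
    cnt p (xs ++ ys) = cnt p xs + cnt (xs.getLastD p) ys := by
  induction xs generalizing p with
  | nil => simp [cnt]
  | cons b t ih =>
    simp only [List.cons_append, cnt, ih b, List.getLastD_cons]
    omega

/-- Single rotation preserves the circular rising-edge count. -/
theorem ccnt_rot1 (h : Bool) (t : List Bool) : ccnt (t ++ [h]) = ccnt (h :: t) := by
  unfold ccnt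
  rw [List.getLastD_concat, cnt_append]
  simp only [List.getLastD_cons, cnt]
  cases h <;> cases hl : t.getLastD true <;>
    simp_all [cnt] <;> omega

theorem ccnt_rotate (l : List Bool) (n : Nat) : ccnt (l.rotate n) = ccnt l := by
  induction n generalizing l with
  | zero => simp [List.rotate_zero]
  | succ k ih =>
    cases l with
    | nil => simp
    | cons h t =>
      rw [List.rotate_cons_succ, ih, ← List.rotate_zero (t ++ [h]), List.rotate_zero,
        ccnt_rot1]

/-- Linear "01"-pair count over a character list (mirrors Chars.count's scan for sub = "01"). -/
def ledges : List Char → Nat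
  | [] => 0
  | [_] => 0
  | a :: b :: t => if a = '0' ∧ b = '1' then 1 + ledges t else ledges (b :: t)

theorem count_go_eq_ledges (fuel : Nat) (l : List Char) (acc : Nat) (hf : l.length ≤ fuel) :
    PySem.Chars.count.go ['0', '1'] fuel l acc = acc + ledges l := by
  induction fuel generalizing l acc with
  | zero =>
    have : l = [] := by cases l <;> simp_all
    subst this
    simp [PySem.Chars.count.go, ledges]
  | succ k ih =>
    cases l with
    | nil => simp [PySem.Chars.count.go, ledges]
    | cons a rest =>
      rw [PySem.Chars.count.go]
      by_cases hp : List.isPrefixOf ['0', '1'] (a :: rest) = true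
      · obtain ⟨b, t, rfl, ha, hb⟩ : ∃ b t, rest = b :: t ∧ a = '0' ∧ b = '1' := by
          cases rest with
          | nil => simp [List.isPrefixOf] at hp
          | cons b t =>
            have h2 : '0' = a ∧ '1' = b := by simpa [List.isPrefixOf] using hp
            exact ⟨b, t, rfl, h2.1.symm, h2.2.symm⟩
        subst ha; subst hb
        simp only [hp, if_true, List.length_cons] at *
        rw [ih _ _ (by simpa using Nat.le_of_succ_le_succ (by omega))]
        simp [ledges]
        omega
      · simp only [hp, if_false, Bool.false_eq_true]
        rw [ih rest acc (by simp at hf; omega)]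
        congr 1
        cases rest with
        | nil => simp [ledges]
        | cons b t =>
          have : ¬ (a = '0' ∧ b = '1') := by
            intro ⟨h1, h2⟩; subst h1; subst h2; simp [List.isPrefixOf] at hp
          simp [ledges, this]

theorem ledges_map_enc (l : List Bool) : ledges (l.map enc) = cnt true l := by
  match l with
  | [] => simp [ledges, cnt]
  | [b] => cases b <;> simp [ledges, cnt, enc]
  | a :: b :: t =>
    have iht := ledges_map_enc t
    have ihbt := ledges_map_enc (b :: t)
    cases a <;> cases b <;> simp [ledges, cnt, enc] at * <;> omega
termination_by l.length

theorem cnt_cons_false (p : Bool) (t : List Bool) : cnt p (false :: t) = cnt false t := by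
  simp [cnt]

theorem singleton_infix_iff_mem (c : Char) (l : List Char) : [c] <:+: l ↔ c ∈ l := by
  constructor
  · rintro ⟨s, t, rfl⟩; simp
  · intro h
    obtain ⟨s, t, rfl⟩ := List.append_of_mem h
    exact ⟨s, t, by simp⟩

/-- A's port computes the circular rising-edge count. -/
theorem portA_eq_ccnt (values : List Bool) :
    circular_true_group_count_py values = (ccnt values : Int) := by
  unfold circular_true_group_count_py
  by_cases hg : (values.isEmpty || !(values.any id)) = true
  · rw [if_pos hg]
    rcases Bool.or_eq_true_iff.mp hg with he | hna
    · have : values = [] := by simpa using he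
      subst this; simp [ccnt, cnt]
    · have hall : ∀ x ∈ values, x = false := by
        have hfa : values.any id = false := by simpa using hna
        intro x hx
        cases x
        · rfl
        · have h2 : values.any id = true := (List.any_eq_true (p := id) (l := values)).mpr ⟨true, hx, rfl⟩
          rw [hfa] at h2
          exact absurd h2 (by simp)
      simp [ccnt, cnt_all_false _ _ hall]
  · rw [if_neg hg]
    simp only [PySem.List.pyGet?_neg_one]
    rw [foldl_eq_cnt]
    simp [ccnt, List.getLastD_eq_getLast?]

/-- B's port computes the circular rising-edge count. -/
theorem portB_eq_ccnt (values : List Bool) :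
    circular_true_group_count_py_alt values = (ccnt values : Int) := by
  unfold circular_true_group_count_py_alt
  have hbits : PySem.Chars.join [] (values.map (fun v => if v then ['1'] else ['0']))
      = values.map enc := by
    have h1 : values.map (fun v => if v then ['1'] else ['0'])
        = (values.map enc).map (fun c => [c]) := by
      simp only [List.map_map]
      refine List.map_congr_left ?_
      intro v _
      cases v <;> simp [enc]
    rw [h1]
    exact PySem.Chars.join_nil_singletons (values.map enc)
  rw [hbits]
  by_cases hpiv : PySem.Chars.find (values.map enc) ['0'] = -1
  · rw [if_pos hpiv]
    have hni := (PySem.Chars.find_eq_neg_one_iff _ _).mp hpiv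
    have hall : ∀ x ∈ values, x = true := by
      intro x hx
      by_contra hxf
      have hx0 : x = false := by cases x <;> simp_all
      exact hni ((singleton_infix_iff_mem '0' _).mpr
        (List.mem_map.mpr ⟨x, hx, by simp [enc, hx0]⟩))
    cases hv : values with
    | nil => simp [ccnt, cnt]
    | cons b t =>
      subst hv
      have hlast : (b :: t).getLastD false = true :=
        hall _ (by rw [List.getLastD_eq_getLast? ]; exact List.mem_of_mem_getLast? (by
          simp [List.getLast?_eq_some_getLast (l := b :: t) (by simp)]))
      rw [ccnt, hlast, cnt_all_true _ hall]
      simp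
  · rw [if_neg hpiv]
    have h0 : 0 ≤ PySem.Chars.find (values.map enc) ['0'] := by
      have := PySem.Chars.neg_one_le_find (values.map enc) ['0']
      omega
    set piv := PySem.Chars.find (values.map enc) ['0'] with hpv
    have hspec := (PySem.Chars.find_spec (s := values.map enc) (sub := ['0']) h0).1
    set p := piv.toNat with hp
    -- the character at position p is '0'
    obtain ⟨rest, hdrop⟩ : ∃ rest, (values.map enc).drop p = '0' :: rest := by
      obtain ⟨t, ht⟩ := hspec
      exact ⟨t, by simpa using ht.symm⟩
    have hplen : p < values.length := by
      by_contra hge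
      rw [List.drop_eq_nil_of_le (by simpa using Nat.le_of_not_lt hge)] at hdrop
      simp at hdrop
    -- the slices are drop/take
    rw [PySem.List.slice_from _ h0, PySem.List.slice_to _ h0]
    -- count = ledges of the rotated encoded list
    have hmap : (values.map enc).drop p ++ (values.map enc).take p
        = (values.rotate p).map enc := by
      rw [List.rotate_eq_drop_append_take (le_of_lt hplen), List.map_append,
        List.map_drop, List.map_take]
    rw [hmap]
    have hcount : PySem.Chars.count ((values.rotate p).map enc) ['0', '1']
        = ledges ((values.rotate p).map enc) := by
      rw [PySem.Chars.count]
      simp only [List.isEmpty_cons, if_false, Bool.false_eq_true]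
      rw [count_go_eq_ledges _ _ _ (le_refl _)]
      simp
    rw [hcount, ledges_map_enc]
    -- the rotated list starts with false
    have hdropv : List.map enc (values.drop p) = '0' :: rest := by
      rw [List.map_drop]; exact hdrop
    obtain ⟨vt, hvdrop⟩ : ∃ vt, values.drop p = false :: vt := by
      cases hvd : values.drop p with
      | nil => rw [hvd] at hdropv; simp at hdropv
      | cons vb vt =>
        rw [hvd] at hdropv
        simp only [List.map_cons, List.cons.injEq] at hdropv
        have hvb : vb = false := by
          cases vb
          · rfl
          · exfalso
            have h1 := hdropv.1
            simp [enc] at h1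
        exact ⟨vt, by rw [hvb]⟩
    have hrot : values.rotate p = false :: (vt ++ values.take p) := by
      rw [List.rotate_eq_drop_append_take (le_of_lt hplen), hvdrop]
      rfl
    have : cnt true (values.rotate p) = ccnt values := by
      rw [← ccnt_rotate values p, hrot, cnt_cons_false, ccnt, List.getLastD_cons,
        cnt_cons_false]
    rw [this]

-- ===== VERDICT (by name: the statement is the Claim_ definition above) =====
theorem circular_true_group_count_py_spec : Claim_equal_circular_true_group_count_py := by
  intro values _
  show circular_true_group_count_py values = circular_true_group_count_py_alt values
  rw [portA_eq_ccnt, portB_eq_ccnt]
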